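-- pv_equiv track=rewrite | github.com/davehenton/skolagatt | common/util.py | lesskilnings_results
-- ===== SOURCE A (Python) =====
-- def lesskilnings_results(input_values):
--     '''
--     Skilum niðurstöðum prófs í lesskilningi
--     '''
--     # Cycle through input_values, sum up all values where the key starts with
--     # 'hljod_', 'mal_', 'bok_'. Checks for input errors.
--     lesskilnings_sums = {'hljod_': 0, 'mal_': 0, 'bok_': 0}
--     for key, value in input_values.items():
--         for type_sum in lesskilnings_sums.keys():
--             # type = 'hljod_' for instance, type_sum for 'hljod_' starts as 0
--             if key.startswith(type_sum):
--                 if not str(value).isdigit():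
--                     # Input error so we will make this type_sum permanently = -1 to indicate error
--                     lesskilnings_sums[type_sum] = -1
--                 elif str(value).isdigit() and not lesskilnings_sums[type_sum] == -1:
--                     # Not input error so let's add up
--                     lesskilnings_sums[type_sum] += int(value)
--
--     hopar = []
--     if lesskilnings_sums["hljod_"] == -1:
--         hopar.append('Vantar gögn')
--     elif lesskilnings_sums["hljod_"] <= 14:
--         hopar.append('Áhætta 1')
--     elif lesskilnings_sums["hljod_"] <= 17:
--         hopar.append('Áhætta 2')
--     elif lesskilnings_sums["hljod_"] <= 19:
--         hopar.append('Óvissa')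
--     else:
--         hopar.append('Utan áhættu')
--
--     if lesskilnings_sums["mal_"] == -1:
--         hopar.append('Vantar gögn')
--     elif lesskilnings_sums["mal_"] <= 14:
--         hopar.append('Áhætta 1')
--     elif lesskilnings_sums["mal_"] <= 16:
--         hopar.append('Áhætta 2')
--     elif lesskilnings_sums["mal_"] <= 17:
--         hopar.append('Óvissa')
--     else:
--         hopar.append('Utan áhættu')
--
--     if lesskilnings_sums["bok_"] == -1:
--         hopar.append('Vantar gögn')
--     elif lesskilnings_sums["bok_"] <= 7:
--         hopar.append('Áhætta 1')
--     elif lesskilnings_sums["bok_"] <= 10: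
--         hopar.append('Áhætta 2')
--     elif lesskilnings_sums["bok_"] <= 12:
--         hopar.append('Óvissa')
--     else:
--         hopar.append('Utan áhættu')
--
--     return hopar
-- ===== SOURCE B (Python) =====
-- def lesskilnings_results(input_values):
--     '''
--     Skilum niðurstöðum prófs í lesskilningi
--     '''
--     # Per category: an error exists iff ANY matching value is non-digit (this is
--     # exactly what A's sticky -1 computes, since digit values are non-negative);
--     # otherwise the total is the plain sum, and the label is picked by the RANK
--     # of the total among the thresholds (how many thresholds it exceeds).
--     categories = (('hljod_', (14, 17, 19)), ('mal_', (14, 16, 17)), ('bok_', (7, 10, 12)))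
--     labels = ('Áhætta 1', 'Áhætta 2', 'Óvissa', 'Utan áhættu')
--     hopar = []
--     for prefix, limits in categories:
--         values = [v for k, v in input_values.items() if k.startswith(prefix)]
--         if any(not str(v).isdigit() for v in values):
--             hopar.append('Vantar gögn')
--         else:
--             total = sum(int(v) for v in values)
--             hopar.append(labels[sum(total > limit for limit in limits)])
--     return hopar
-- ===== Notes on version B (the rewrite author's own statement) =====
-- stated objective: alternative
-- what changed: Replaces A's stateful single pass (a mutable three-key dict with a sticky -1 error sentinel threaded through nested loops, followed by three unrolled if/elif ladders) by a stateless per-category computation: filter the matching values, detect errors with any(), total them with sum(), and pick the label arithmetically by the total's rank among the thresholds instead of branching.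
import Mathlib
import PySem

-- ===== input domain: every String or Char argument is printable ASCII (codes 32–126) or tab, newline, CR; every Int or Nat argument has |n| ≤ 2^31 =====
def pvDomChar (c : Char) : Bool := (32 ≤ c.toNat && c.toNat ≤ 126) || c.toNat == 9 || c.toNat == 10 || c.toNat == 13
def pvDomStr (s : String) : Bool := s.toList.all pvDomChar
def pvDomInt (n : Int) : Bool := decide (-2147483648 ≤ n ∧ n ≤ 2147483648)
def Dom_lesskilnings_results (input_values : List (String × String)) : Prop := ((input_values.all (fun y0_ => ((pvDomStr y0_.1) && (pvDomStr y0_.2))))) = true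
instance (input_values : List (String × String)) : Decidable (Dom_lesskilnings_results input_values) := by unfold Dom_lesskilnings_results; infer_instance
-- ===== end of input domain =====

-- B replaces A's stateful pass (mutable three-key dict, sticky -1 sentinel, three
-- unrolled if/elif ladders) by a stateless per-category filter/any/sum and an
-- arithmetic rank lookup for the label: a different decomposition, same cost.

-- ===== PORT A =====
-- body of A's inner `for type_sum in lesskilnings_sums.keys()` loop
def pvInner (kv : String × String) (d : PySem.Dict String Int) (ts : String) : PySem.Dict String Int :=
  if PySem.Str.startswith kv.1 ts then
    if ¬ (PySem.Str.strIsdigit kv.2) then d.insert ts (-1)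
    else if PySem.Str.strIsdigit kv.2 ∧ ¬ (d.getD ts 0 = -1) then
      d.insert ts (d.getD ts 0 + (PySem.Int.ofStr? kv.2).getD 0)
    else d
  else d

-- one step of A's outer `for key, value in input_values.items()` loop
def pvStepA (kv : String × String) (d : PySem.Dict String Int) : PySem.Dict String Int :=
  (d.keys).foldl (pvInner kv) d

def lesskilnings_results (input_values : List (String × String)) : List String :=
  let d0 : PySem.Dict String Int :=
    ((PySem.Dict.empty.insert "hljod_" 0).insert "mal_" 0).insert "bok_" 0
  let d := input_values.foldl (fun d kv => pvStepA kv d) d0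
  let h := d.getD "hljod_" 0
  let m := d.getD "mal_" 0
  let b := d.getD "bok_" 0
  (if h = -1 then ["Vantar gögn"]
   else if h ≤ 14 then ["Áhætta 1"]
   else if h ≤ 17 then ["Áhætta 2"]
   else if h ≤ 19 then ["Óvissa"]
   else ["Utan áhættu"]) ++
  (if m = -1 then ["Vantar gögn"]
   else if m ≤ 14 then ["Áhætta 1"]
   else if m ≤ 16 then ["Áhætta 2"]
   else if m ≤ 17 then ["Óvissa"]
   else ["Utan áhættu"]) ++
  (if b = -1 then ["Vantar gögn"]
   else if b ≤ 7 then ["Áhætta 1"]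
   else if b ≤ 10 then ["Áhætta 2"]
   else if b ≤ 12 then ["Óvissa"]
   else ["Utan áhættu"])

-- ===== PORT B =====
-- B's `[v for k, v in input_values.items() if k.startswith(prefix)]`
def pvMatchVals (input_values : List (String × String)) (p : String) : List String :=
  (input_values.filter (fun kv => PySem.Str.startswith kv.1 p)).map (fun kv => kv.2)

def pvLabels : List String := ["Áhætta 1", "Áhætta 2", "Óvissa", "Utan áhættu"]
def pvCats : List (String × List Int) :=
  [("hljod_", [14, 17, 19]), ("mal_", [14, 16, 17]), ("bok_", [7, 10, 12])]

def lesskilnings_results_alt (input_values : List (String × String)) : List String :=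
  pvCats.map (fun pl =>
    let values := pvMatchVals input_values pl.1
    if values.any (fun v => ¬ PySem.Str.strIsdigit v) then "Vantar gögn"
    else
      let total := (values.map (fun v => (PySem.Int.ofStr? v).getD 0)).foldl (· + ·) 0
      -- labels[rank]: the rank is at most 3 < 4 = len(labels), so get?/getD is Python's labels[rank]
      (pvLabels[(pl.2.foldl (fun n lim => n + (if total > lim then 1 else 0)) 0 : Nat)]?).getD "")

-- ===== PRECONDITION & SPEC =====
def Spec_lesskilnings_results (input_values : List (String × String)) (out : List String) : Prop := out = lesskilnings_results_alt input_values
instance (input_values : List (String × String)) (out : List String) : Decidable (Spec_lesskilnings_results input_values out) := by unfold Spec_lesskilnings_results; infer_instance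

-- ===== CLAIM (what is proved, stated in full; the proofs are below) =====
def Claim_equal_lesskilnings_results : Prop := ∀ (input_values : List (String × String)), Dom_lesskilnings_results input_values → Spec_lesskilnings_results input_values (lesskilnings_results input_values)

-- ===== LEMMAS AND PROOFS =====

-- an all-digit Python string parses to a non-negative int
theorem pvOfStr_nonneg (s : String) (h : PySem.Str.strIsdigit s = true) :
    0 ≤ (PySem.Int.ofStr? s).getD 0 := by
  unfold PySem.Str.strIsdigit PySem.Chars.strIsdigit at h
  obtain ⟨hne, hall⟩ := Bool.and_eq_true_iff.mp h
  unfold PySem.Int.ofStr? PySem.Int.ofChars?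
  have hdw : ∀ cs : List Char, cs.all PySem.Chars.isdigit = true →
      List.dropWhile PySem.Int.isIntSpace cs = cs := by
    intro cs hcs
    cases cs with
    | nil => rfl
    | cons c rest =>
      have hc : PySem.Chars.isdigit c = true := by
        simp [List.all_cons] at hcs; exact hcs.1
      have : PySem.Int.isIntSpace c = false := by
        unfold PySem.Chars.isdigit at hc
        unfold PySem.Int.isIntSpace
        simp at hc ⊢
        obtain ⟨h1, h2⟩ := hc
        and_intros <;> (intro he; subst he; revert h1; decide)
      simp [this]
  have hall' : (s.toList.reverse).all PySem.Chars.isdigit = true := by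
    simpa [List.all_reverse] using hall
  rw [hdw _ hall]
  rw [hdw _ hall', List.reverse_reverse]
  cases hs : s.toList with
  | nil => simp [hs] at hne
  | cons c rest =>
    have hc : PySem.Chars.isdigit c = true := by
      rw [hs] at hall; simp [List.all_cons] at hall; exact hall.1
    have hcm : c ≠ '-' ∧ c ≠ '+' := by
      unfold PySem.Chars.isdigit at hc
      simp at hc
      constructor <;> (intro he; subst he; revert hc; decide)
    simp only []
    split
    · next heq => exact absurd (List.cons_eq_cons.mp heq).1 hcm.1
    · next heq => exact absurd (List.cons_eq_cons.mp heq).1 hcm.2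
    · simp only [bind, Option.bind, Option.map]
      split
      · next x heq =>
        split at heq
        · simp at heq
        · next b hb =>
          simp only [pure, Option.some.injEq] at heq
          subst heq
          simp
      · simp

-- the three-entry dict A maintains, abstracted over its values
def pvMkD (a b c : Int) : PySem.Dict String Int :=
  ((PySem.Dict.empty.insert "hljod_" a).insert "mal_" b).insert "bok_" c

-- one element's effect on one category's sum in A
def pvStepS (p : String) (total : Int) (kv : String × String) : Int :=
  if PySem.Str.startswith kv.1 p then
    if ¬ (PySem.Str.strIsdigit kv.2) then -1
    else if ¬ (total = -1) then total + (PySem.Int.ofStr? kv.2).getD 0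
    else total
  else total

theorem pvKeys_mkD (a b c : Int) : (pvMkD a b c).keys = ["hljod_", "mal_", "bok_"] := by
  simp [pvMkD, PySem.Dict.insert, PySem.Dict.empty, PySem.Dict.keys]
theorem pvIns_h (a b c v : Int) : (pvMkD a b c).insert "hljod_" v = pvMkD v b c := by
  simp [pvMkD, PySem.Dict.insert, PySem.Dict.empty]
theorem pvIns_m (a b c v : Int) : (pvMkD a b c).insert "mal_" v = pvMkD a v c := by
  simp [pvMkD, PySem.Dict.insert, PySem.Dict.empty]
theorem pvIns_b (a b c v : Int) : (pvMkD a b c).insert "bok_" v = pvMkD a b v := by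
  simp [pvMkD, PySem.Dict.insert, PySem.Dict.empty]
theorem pvGetD_h (a b c : Int) : (pvMkD a b c).getD "hljod_" 0 = a := by
  simp [pvMkD, PySem.Dict.getD_insert]
theorem pvGetD_m (a b c : Int) : (pvMkD a b c).getD "mal_" 0 = b := by
  simp [pvMkD, PySem.Dict.getD_insert]
theorem pvGetD_b (a b c : Int) : (pvMkD a b c).getD "bok_" 0 = c := by
  simp [pvMkD]

theorem pvInner_h (kv : String × String) (a b c : Int) :
    pvInner kv (pvMkD a b c) "hljod_" = pvMkD (pvStepS "hljod_" a kv) b c := by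
  unfold pvInner pvStepS
  rw [pvGetD_h, pvIns_h, pvIns_h]
  split_ifs with h1 h2 h3 <;> simp_all
theorem pvInner_m (kv : String × String) (a b c : Int) :
    pvInner kv (pvMkD a b c) "mal_" = pvMkD a (pvStepS "mal_" b kv) c := by
  unfold pvInner pvStepS
  rw [pvGetD_m, pvIns_m, pvIns_m]
  split_ifs with h1 h2 h3 <;> simp_all
theorem pvInner_b (kv : String × String) (a b c : Int) :
    pvInner kv (pvMkD a b c) "bok_" = pvMkD a b (pvStepS "bok_" c kv) := by
  unfold pvInner pvStepS
  rw [pvGetD_b, pvIns_b, pvIns_b]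
  split_ifs with h1 h2 h3 <;> simp_all

theorem pvStepA_mkD (kv : String × String) (a b c : Int) :
    pvStepA kv (pvMkD a b c) = pvMkD (pvStepS "hljod_" a kv) (pvStepS "mal_" b kv) (pvStepS "bok_" c kv) := by
  unfold pvStepA
  rw [pvKeys_mkD]
  simp only [List.foldl_cons, List.foldl_nil, pvInner_h, pvInner_m, pvInner_b]

theorem pvFold_mkD (xs : List (String × String)) (a b c : Int) :
    xs.foldl (fun d kv => pvStepA kv d) (pvMkD a b c) =
      pvMkD (xs.foldl (pvStepS "hljod_") a) (xs.foldl (pvStepS "mal_") b) (xs.foldl (pvStepS "bok_") c) := by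
  induction xs generalizing a b c with
  | nil => rfl
  | cons kv xs ih => simp [List.foldl_cons, pvStepA_mkD, ih]

-- -1 is absorbing for A's per-category step
theorem pvStepS_absorb (p : String) (xs : List (String × String)) :
    xs.foldl (pvStepS p) (-1) = -1 := by
  induction xs with
  | nil => rfl
  | cons kv xs ih =>
    have : pvStepS p (-1) kv = -1 := by
      unfold pvStepS; split_ifs <;> simp_all
    simp [List.foldl_cons, this, ih]

-- A's sticky -1 fold = "error iff any matching non-digit, else plain sum"
theorem pvStepS_char (p : String) (xs : List (String × String)) (t : Int) (ht : 0 ≤ t) :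
    xs.foldl (pvStepS p) t =
      if (pvMatchVals xs p).any (fun v => ¬ PySem.Str.strIsdigit v) then -1
      else ((pvMatchVals xs p).map (fun v => (PySem.Int.ofStr? v).getD 0)).foldl (· + ·) t := by
  induction xs generalizing t with
  | nil => simp [pvMatchVals]
  | cons kv xs ih =>
    by_cases hs : PySem.Str.startswith kv.1 p
    · by_cases hd : PySem.Str.strIsdigit kv.2
      · have hstep : pvStepS p t kv = t + (PySem.Int.ofStr? kv.2).getD 0 := by
          unfold pvStepS; split_ifs <;> simp_all
        have ht' : 0 ≤ t + (PySem.Int.ofStr? kv.2).getD 0 := by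
          have := pvOfStr_nonneg kv.2 hd; omega
        simp only [List.foldl_cons, hstep, ih _ ht']
        simp only [pvMatchVals, List.filter_cons, hs, if_true, List.map_cons,
          List.any_cons, List.foldl_cons, hd]
        simp only [decide_not, decide_true, Bool.not_true, Bool.false_or]
      · have hstep : pvStepS p t kv = -1 := by
          unfold pvStepS; split_ifs <;> simp_all
        have hd' : PySem.Str.strIsdigit kv.2 = false := by simpa using hd
        simp only [List.foldl_cons, hstep, pvStepS_absorb]
        simp only [pvMatchVals, List.filter_cons, hs, if_true, List.map_cons,
          List.any_cons, hd']
        simp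
    · have hstep : pvStepS p t kv = t := by
        unfold pvStepS; split_ifs <;> simp_all
      have hs' : PySem.Str.startswith kv.1 p = false := by simpa using hs
      simp only [List.foldl_cons, hstep, ih _ ht]
      simp only [pvMatchVals, List.filter_cons, hs']
      simp

-- if every matching value is a digit string, the sum is non-negative
theorem pvSum_nonneg (vs : List String) (t : Int) (ht : 0 ≤ t)
    (h : vs.any (fun v => ¬ PySem.Str.strIsdigit v) = false) :
    0 ≤ (vs.map (fun v => (PySem.Int.ofStr? v).getD 0)).foldl (· + ·) t := by
  induction vs generalizing t with
  | nil => simpa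
  | cons v vs ih =>
    simp only [List.any_cons, Bool.or_eq_false_iff] at h
    have hv : PySem.Str.strIsdigit v = true := by
      rcases h with ⟨h1, -⟩; simpa using h1
    have := pvOfStr_nonneg v hv
    simp only [List.map_cons, List.foldl_cons]
    exact ih (t + _) (by omega) h.2

-- rank lookup = the if/elif ladder, for ordered thresholds and a non-negative total
theorem pvRank3 (s a b c : Int) (hab : a ≤ b) (hbc : b ≤ c) :
    (pvLabels[(([a, b, c] : List Int).foldl
        (fun n lim => n + (if s > lim then 1 else 0)) 0 : Nat)]?).getD "" =
      (if s ≤ a then "Áhætta 1" else if s ≤ b then "Áhætta 2"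
       else if s ≤ c then "Óvissa" else "Utan áhættu") := by
  simp only [List.foldl_cons, List.foldl_nil]
  split_ifs with g1 g2 g3 g4 g5 g6 <;> simp_all [pvLabels] <;> omega

-- one category: A's sticky fold + if/elif ladder = B's any/sum + rank lookup
theorem pvCatEq (xs : List (String × String)) (p : String) (a b c : Int)
    (hab : a ≤ b) (hbc : b ≤ c) :
    (if xs.foldl (pvStepS p) 0 = -1 then "Vantar gögn"
     else if xs.foldl (pvStepS p) 0 ≤ a then "Áhætta 1"
     else if xs.foldl (pvStepS p) 0 ≤ b then "Áhætta 2"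
     else if xs.foldl (pvStepS p) 0 ≤ c then "Óvissa" else "Utan áhættu") =
    (if (pvMatchVals xs p).any (fun v => ¬ PySem.Str.strIsdigit v) then "Vantar gögn"
     else (pvLabels[((([a, b, c] : List Int).foldl
         (fun n lim => n +
           (if ((pvMatchVals xs p).map (fun v => (PySem.Int.ofStr? v).getD 0)).foldl (· + ·) 0 > lim
            then 1 else 0)) 0) : Nat)]?).getD "") := by
  rw [pvStepS_char p xs 0 le_rfl]
  by_cases he : (pvMatchVals xs p).any (fun v => ¬ PySem.Str.strIsdigit v) = true
  · simp only [he, if_true]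
  · have he' : (pvMatchVals xs p).any (fun v => ¬ PySem.Str.strIsdigit v) = false := by
      simpa using he
    have hnn := pvSum_nonneg (pvMatchVals xs p) 0 le_rfl he'
    rw [pvRank3 _ a b c hab hbc]
    simp only [he', Bool.false_eq_true, if_false]
    have hne : ¬ (((pvMatchVals xs p).map (fun v => (PySem.Int.ofStr? v).getD 0)).foldl (· + ·) 0 = -1) := by
      omega
    simp only [hne, if_false]

-- ===== VERDICT (by name: the statement is the Claim_ definition above) =====
theorem lesskilnings_results_spec : Claim_equal_lesskilnings_results := by
  intro xs _
  unfold Spec_lesskilnings_results lesskilnings_results lesskilnings_results_alt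
  have h := pvFold_mkD xs 0 0 0
  simp only [pvMkD] at h ⊢
  rw [h]
  have h1 := pvGetD_h (xs.foldl (pvStepS "hljod_") 0) (xs.foldl (pvStepS "mal_") 0) (xs.foldl (pvStepS "bok_") 0)
  have h2 := pvGetD_m (xs.foldl (pvStepS "hljod_") 0) (xs.foldl (pvStepS "mal_") 0) (xs.foldl (pvStepS "bok_") 0)
  have h3 := pvGetD_b (xs.foldl (pvStepS "hljod_") 0) (xs.foldl (pvStepS "mal_") 0) (xs.foldl (pvStepS "bok_") 0)
  simp only [pvMkD] at h1 h2 h3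
  rw [h1, h2, h3]
  simp only [pvCats, List.map_cons, List.map_nil]
  rw [← pvCatEq xs "hljod_" 14 17 19 (by norm_num) (by norm_num),
      ← pvCatEq xs "mal_" 14 16 17 (by norm_num) (by norm_num),
      ← pvCatEq xs "bok_" 7 10 12 (by norm_num) (by norm_num)]
  split_ifs <;> rfl
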